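-- pv_equiv track=rewrite | github.com/boomoioi/OOD | chapter5/radix.py | getNumAt
-- ===== SOURCE A (Python) =====
-- def getNumAt(digit, num):
--     num = abs(num)
--     i=0
--     res = -1
--     while i<digit:
--         res = num%10
--         num = num//10
--         i+=1
--     return res
-- ===== SOURCE B (Python) =====
-- def getNumAt(digit, num):
--     if digit <= 0:
--         return -1
--     return abs(num) // 10 ** (digit - 1) % 10
-- ===== Notes on version B (the rewrite author's own statement) =====
-- stated objective: simpler
-- what changed: Replaces A's digit-peeling while loop by a closed-form expression: one floor division by 10**(digit-1) followed by mod 10 (with A's digit<=0 -> -1 guard).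
import Mathlib
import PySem

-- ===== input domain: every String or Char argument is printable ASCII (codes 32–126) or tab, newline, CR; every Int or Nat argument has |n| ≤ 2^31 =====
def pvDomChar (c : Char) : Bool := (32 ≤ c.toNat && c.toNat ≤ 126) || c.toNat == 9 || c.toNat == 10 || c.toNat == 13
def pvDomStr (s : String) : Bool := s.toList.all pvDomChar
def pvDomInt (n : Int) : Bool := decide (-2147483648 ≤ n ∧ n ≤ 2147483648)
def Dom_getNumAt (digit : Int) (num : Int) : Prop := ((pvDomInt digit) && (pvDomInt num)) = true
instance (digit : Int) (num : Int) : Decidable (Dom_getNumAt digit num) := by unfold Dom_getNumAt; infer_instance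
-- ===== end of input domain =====

-- B replaces A's digit-peeling while loop by the closed form abs(num) // 10**(digit-1) % 10 (simpler, no loop).
-- ===== PORT A =====
-- the while loop: i counts up to digit, so it runs (digit - i).toNat more times; state = (num, res)
def pvLoopA : Nat → Int → Int → Int
  | 0, _, res => res
  | n + 1, num, _ => pvLoopA n (PySem.Int.floordiv num 10) (PySem.Int.mod num 10)

def getNumAt (digit : Int) (num : Int) : Int := pvLoopA digit.toNat |num| (-1)

-- ===== PORT B =====
def getNumAt_alt (digit : Int) (num : Int) : Int :=
  if digit ≤ 0 then -1
  else PySem.Int.mod (PySem.Int.floordiv |num| ((10 : Int) ^ (digit - 1).toNat)) 10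

-- ===== PRECONDITION & SPEC =====
def Spec_getNumAt (digit : Int) (num : Int) (out : Int) : Prop := out = getNumAt_alt digit num
instance (digit : Int) (num : Int) (out : Int) : Decidable (Spec_getNumAt digit num out) := by unfold Spec_getNumAt; infer_instance

-- ===== CLAIM (what is proved, stated in full; the proofs are below) =====
def Claim_equal_getNumAt : Prop := ∀ (digit : Int) (num : Int), Dom_getNumAt digit num → Spec_getNumAt digit num (getNumAt digit num)

-- ===== LEMMAS AND PROOFS =====

-- ===== VERDICT (by name: the statement is the Claim_ definition above) =====
-- the loop, run n+1 times on a nonnegative m, returns digit n of m (0-indexed from the right)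
theorem pvLoopA_closed (n : Nat) : ∀ (m res : Int), 0 ≤ m →
    pvLoopA (n + 1) m res = PySem.Int.mod (PySem.Int.floordiv m ((10 : Int) ^ n)) 10 := by
  induction n with
  | zero =>
    intro m res hm
    simp [pvLoopA, PySem.Int.floordiv, Int.fdiv_eq_ediv]
  | succ k ih =>
    intro m res hm
    show pvLoopA (k + 1) (PySem.Int.floordiv m 10) (PySem.Int.mod m 10) = _
    rw [ih _ _ (by
      simp only [PySem.Int.floordiv, Int.fdiv_eq_ediv]
      have : (0:Int) ≤ m / 10 := Int.ediv_nonneg hm (by norm_num)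
      simp only [if_pos (Or.inl (by norm_num : (0:Int) ≤ 10))]
      omega)]
    simp only [PySem.Int.floordiv, Int.fdiv_eq_ediv,
      if_pos (Or.inl (by norm_num : (0:Int) ≤ 10)),
      if_pos (Or.inl (pow_nonneg (by norm_num : (0:Int) ≤ 10) k)),
      if_pos (Or.inl (pow_nonneg (by norm_num : (0:Int) ≤ 10) (k+1)))]
    rw [sub_zero, sub_zero, sub_zero, Int.ediv_ediv_of_nonneg (by norm_num : (0:Int) ≤ 10)]
    ring_nf

theorem getNumAt_spec : Claim_equal_getNumAt := by
  intro digit num _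
  unfold Spec_getNumAt getNumAt getNumAt_alt
  by_cases h : digit ≤ 0
  · have : digit.toNat = 0 := Int.toNat_of_nonpos h
    simp [this, pvLoopA, h]
  · have h1 : 1 ≤ digit := by omega
    have hn : digit.toNat = (digit - 1).toNat + 1 := by omega
    rw [if_neg h, hn, pvLoopA_closed _ _ _ (abs_nonneg num)]
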